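-- pv_equiv track=rewrite | github.com/zura7cinco7/goa | Level 049/Homework/Homework.py | shared_bits
-- ===== SOURCE A (Python) =====
-- def shared_bits(a, b):
--     count = 0
--     while a > 0 and b > 0:
--         count += (a & 1) & (b & 1)
--         if count >= 2:
--             return True
--         a >>= 1
--         b >>= 1
--     return False
-- ===== SOURCE B (Python) =====
-- def shared_bits(a, b):
--     if a <= 0 or b <= 0:
--         return False
--     return (a & b).bit_count() >= 2
-- ===== Notes on version B (the rewrite author's own statement) =====
-- stated objective: simpler
-- what changed: Replaces A's bit-by-bit shifting loop with a counter and early exit by a single whole-value AND followed by a popcount (bit_count), guarding nonpositive inputs first.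
import Mathlib
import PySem

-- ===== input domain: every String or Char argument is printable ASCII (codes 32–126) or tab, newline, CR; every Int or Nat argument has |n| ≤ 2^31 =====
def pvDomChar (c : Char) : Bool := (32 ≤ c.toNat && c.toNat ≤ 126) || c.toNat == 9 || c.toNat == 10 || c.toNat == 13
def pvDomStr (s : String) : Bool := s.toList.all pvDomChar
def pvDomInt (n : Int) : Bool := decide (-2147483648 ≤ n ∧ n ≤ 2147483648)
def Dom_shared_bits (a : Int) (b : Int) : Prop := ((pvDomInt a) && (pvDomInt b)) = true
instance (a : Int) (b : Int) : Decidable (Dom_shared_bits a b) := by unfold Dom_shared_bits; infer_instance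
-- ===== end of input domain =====

-- B replaces A's bit-by-bit shifting loop (counter with early exit) by one whole-value AND
-- plus a popcount, after guarding nonpositive inputs; objective: simpler.

-- needed by the port's termination proof (cited in decreasing_by)
lemma shiftRight_one_toNat (a : Int) (h : 0 ≤ a) : a >>> (1:Int) = ((a.toNat >>> 1 : Nat) : Int) := by
  rcases a with m | m
  · rfl
  · omega

-- ===== PORT A =====
-- the while loop of A: state (a, b, count); terminates because a strictly decreases while a > 0
def sharedBitsLoop (a : Int) (b : Int) (count : Int) : Bool :=
  if h : a > 0 ∧ b > 0 then
    let count := count + PySem.Int.band (PySem.Int.band a 1) (PySem.Int.band b 1)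
    if count ≥ 2 then true
    else sharedBitsLoop (a >>> (1 : Int)) (b >>> (1 : Int)) count
  else false
termination_by a.toNat
decreasing_by
  rw [shiftRight_one_toNat a (le_of_lt h.1)]
  simp only [Int.toNat_natCast, Nat.shiftRight_one]
  omega

def shared_bits (a : Int) (b : Int) : Bool := sharedBitsLoop a b 0

-- ===== PORT B =====
def shared_bits_alt (a : Int) (b : Int) : Bool :=
  if a ≤ 0 || b ≤ 0 then false
  else decide (2 ≤ PySem.Int.bitCount (PySem.Int.band a b))

-- ===== PRECONDITION & SPEC =====
def Spec_shared_bits (a : Int) (b : Int) (out : Bool) : Prop := out = shared_bits_alt a b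
instance (a : Int) (b : Int) (out : Bool) : Decidable (Spec_shared_bits a b out) := by unfold Spec_shared_bits; infer_instance

-- ===== CLAIM (what is proved, stated in full; the proofs are below) =====
def Claim_equal_shared_bits : Prop := ∀ (a : Int) (b : Int), Dom_shared_bits a b → Spec_shared_bits a b (shared_bits a b)

-- ===== LEMMAS AND PROOFS =====

lemma and_low (x y : Nat) : x &&& 1 &&& (y &&& 1) = x &&& y &&& 1 := by
  have h11 : (1:Nat) &&& 1 = 1 := by decide
  calc x &&& 1 &&& (y &&& 1) = x &&& (1 &&& (y &&& 1)) := Nat.and_assoc ..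
    _ = x &&& (y &&& 1 &&& 1) := by rw [Nat.and_comm 1 (y &&& 1)]
    _ = x &&& (y &&& (1 &&& 1)) := by rw [Nat.and_assoc]
    _ = x &&& (y &&& 1) := by rw [h11]
    _ = x &&& y &&& 1 := (Nat.and_assoc ..).symm

-- popcount of a Nat AND splits into the AND of the low bits plus the popcount of the halves
lemma bitCount_and_split (x y : Nat) :
    PySem.Int.bitCount ((x &&& y : Nat) : Int)
      = ((x % 2) &&& (y % 2)) + PySem.Int.bitCount ((x / 2 &&& y / 2 : Nat) : Int) := by
  have hlow : (x &&& y) % 2 = ((x % 2) &&& (y % 2)) := by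
    rw [← Nat.and_one_is_mod x, ← Nat.and_one_is_mod y, and_low, Nat.and_one_is_mod]
  have hdiv : (x &&& y) / 2 = (x / 2 &&& y / 2) := by
    rw [← Nat.shiftRight_one, ← Nat.shiftRight_one, ← Nat.shiftRight_one,
      ← Nat.shiftRight_and_distrib]
  rcases Nat.eq_zero_or_pos (x &&& y) with h0 | hpos
  · have h1 : (x % 2) &&& (y % 2) = 0 := by rw [← hlow, h0]
    have h2 : x / 2 &&& y / 2 = 0 := by rw [← hdiv, h0]
    rw [h0, h1, h2]
    simp
  · rw [PySem.Int.bitCount_natCast hpos, hlow, hdiv]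

-- characterisation of A's loop
lemma loop_eq (n : Nat) : ∀ (a b count : Int), a.toNat ≤ n → 0 ≤ count →
    sharedBitsLoop a b count
      = decide (0 < a ∧ 0 < b ∧ 2 ≤ count + (PySem.Int.bitCount (PySem.Int.band a b) : Int)) := by
  induction n with
  | zero =>
    intro a b count ha _
    have hna : ¬ (0 < a) := by omega
    rw [sharedBitsLoop]
    simp [hna]
  | succ n ih =>
    intro a b count ha hc
    rw [sharedBitsLoop]
    by_cases hab : a > 0 ∧ b > 0
    · obtain ⟨hA, hB⟩ := hab
      have hA' : (0:Int) ≤ a := le_of_lt hA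
      have hB' : (0:Int) ≤ b := le_of_lt hB
      have hband : PySem.Int.band a b = ((a.toNat &&& b.toNat : Nat) : Int) :=
        PySem.Int.band_of_nonneg hA' hB'
      have hb1 : PySem.Int.band a 1 = ((a.toNat % 2 : Nat) : Int) := by
        rw [PySem.Int.band_of_nonneg hA' (by norm_num)]
        norm_num [Nat.and_one_is_mod]
      have hb2 : PySem.Int.band b 1 = ((b.toNat % 2 : Nat) : Int) := by
        rw [PySem.Int.band_of_nonneg hB' (by norm_num)]
        norm_num [Nat.and_one_is_mod]
      have hbit : PySem.Int.band (PySem.Int.band a 1) (PySem.Int.band b 1)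
          = ((a.toNat % 2 &&& b.toNat % 2 : Nat) : Int) := by
        rw [hb1, hb2, PySem.Int.band_natCast]
      have hsha : a >>> (1:Int) = ((a.toNat / 2 : Nat) : Int) := by
        rw [shiftRight_one_toNat a hA', Nat.shiftRight_one]
      have hshb : b >>> (1:Int) = ((b.toNat / 2 : Nat) : Int) := by
        rw [shiftRight_one_toNat b hB', Nat.shiftRight_one]
      have hband' : PySem.Int.band (a >>> (1:Int)) (b >>> (1:Int))
          = ((a.toNat / 2 &&& b.toNat / 2 : Nat) : Int) := by
        rw [hsha, hshb, PySem.Int.band_natCast]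
      have hsplit := bitCount_and_split a.toNat b.toNat
      have hRHS : count + (PySem.Int.bitCount (PySem.Int.band a b) : Int)
          = count + ((a.toNat % 2 &&& b.toNat % 2 : Nat) : Int)
            + (PySem.Int.bitCount ((a.toNat / 2 &&& b.toNat / 2 : Nat) : Int) : Int) := by
        rw [hband, hsplit, Nat.cast_add]
        ring
      rw [dif_pos (And.intro hA hB)]
      by_cases hge : count + PySem.Int.band (PySem.Int.band a 1) (PySem.Int.band b 1) ≥ 2
      · simp only [if_pos hge]
        have h2 : (2:Int) ≤ count + (PySem.Int.bitCount (PySem.Int.band a b) : Int) := by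
          rw [hRHS]
          rw [hbit] at hge
          have : (0:Int) ≤ (PySem.Int.bitCount ((a.toNat / 2 &&& b.toNat / 2 : Nat) : Int) : Int) := by positivity
          omega
        simp [hA, hB, h2]
      · simp only [if_neg hge]
        have hc' : 0 ≤ count + PySem.Int.band (PySem.Int.band a 1) (PySem.Int.band b 1) := by
          rw [hbit]; positivity
        have ha' : (a >>> (1:Int)).toNat ≤ n := by
          rw [hsha]
          simp only [Int.toNat_natCast]
          omega
        rw [ih _ _ _ ha' hc']
        rw [hbit] at hge
        rcases Nat.eq_zero_or_pos (a.toNat / 2) with haz | hapos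
        · have h1 : ¬ (0 < a >>> (1:Int)) := by rw [hsha, haz]; simp
          have h2 : ¬ ((2:Int) ≤ count + (PySem.Int.bitCount (PySem.Int.band a b) : Int)) := by
            rw [hRHS]
            have hd0 : a.toNat / 2 &&& b.toNat / 2 = 0 := by simp [haz]
            rw [hd0]
            simp only [Nat.cast_zero, PySem.Int.bitCount_zero]
            omega
          simp [h1, hA, hB, h2]
        · rcases Nat.eq_zero_or_pos (b.toNat / 2) with hbz | hbpos
          · have h1 : ¬ (0 < b >>> (1:Int)) := by rw [hshb, hbz]; simp
            have h2 : ¬ ((2:Int) ≤ count + (PySem.Int.bitCount (PySem.Int.band a b) : Int)) := by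
              rw [hRHS]
              have hd0 : a.toNat / 2 &&& b.toNat / 2 = 0 := by simp [hbz]
              rw [hd0]
              simp only [Nat.cast_zero, PySem.Int.bitCount_zero]
              omega
            simp [h1, hA, hB, h2]
          · have h1 : 0 < a >>> (1:Int) := by
              rw [hsha]; exact_mod_cast Int.natCast_pos.mpr hapos
            have h2 : 0 < b >>> (1:Int) := by
              rw [hshb]; exact_mod_cast Int.natCast_pos.mpr hbpos
            have hconn : count + PySem.Int.band (PySem.Int.band a 1) (PySem.Int.band b 1)
                  + (PySem.Int.bitCount (PySem.Int.band (a >>> (1:Int)) (b >>> (1:Int))) : Int)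
                = count + (PySem.Int.bitCount (PySem.Int.band a b) : Int) := by
              rw [hbit, hband', hRHS]
            simp only [h1, h2, hA, hB, true_and, hconn]
    · rw [dif_neg hab]
      have h2 : ¬ (0 < a ∧ 0 < b ∧ 2 ≤ count + (PySem.Int.bitCount (PySem.Int.band a b) : Int)) := by
        intro h
        exact hab ⟨h.1, h.2.1⟩
      simp [h2]

-- ===== VERDICT (by name: the statement is the Claim_ definition above) =====
theorem shared_bits_spec : Claim_equal_shared_bits := by
  intro a b _
  unfold Spec_shared_bits shared_bits shared_bits_alt
  rw [loop_eq a.toNat a b 0 le_rfl le_rfl]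
  by_cases ha : a ≤ 0
  · simp [ha, show ¬ (0 < a) by omega]
  · by_cases hb : b ≤ 0
    · simp [hb, show ¬ (0 < b) by omega]
    · have h1 : 0 < a := by omega
      have h2 : 0 < b := by omega
      simp [ha, hb, h1, h2]
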